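-- pv_equiv track=rewrite | github.com/4tie/temp | app/ai/tools/deep_analysis.py | _compute_streak_lengths
-- ===== SOURCE A (Python) =====
-- def _compute_streak_lengths(win_flags: list[int]) -> list[tuple[str, int]]:
--     streaks: list[tuple[str, int]] = []
--     if not win_flags:
--         return streaks
--     current_type = "win" if win_flags[0] == 1 else "loss"
--     current_len = 1
--     for flag in win_flags[1:]:
--         t = "win" if flag == 1 else "loss"
--         if t == current_type:
--             current_len += 1
--         else:
--             streaks.append((current_type, current_len))
--             current_type = t
--             current_len = 1
--     streaks.append((current_type, current_len))
--     return streaks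
-- ===== SOURCE B (Python) =====
-- def _compute_streak_lengths(win_flags: list[int]) -> list[tuple[str, int]]:
--     if not win_flags:
--         return []
--     return _rle(win_flags)
--
--
-- def _rle(flags: list[int]) -> list[tuple[str, int]]:
--     # divide and conquer: RLE each half, then merge at the boundary
--     if len(flags) == 1:
--         return [("win" if flags[0] == 1 else "loss", 1)]
--     mid = len(flags) // 2
--     return _merge(_rle(flags[:mid]), _rle(flags[mid:]))
--
--
-- def _merge(left: list[tuple[str, int]], right: list[tuple[str, int]]) -> list[tuple[str, int]]:
--     (lt, lc), (rt, rc) = left[-1], right[0]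
--     if lt == rt:
--         return left[:-1] + [(lt, lc + rc)] + right[1:]
--     return left + right
-- ===== Notes on version B (the rewrite author's own statement) =====
-- stated objective: alternative
-- what changed: Replaced the left-to-right current_type/current_len state-machine loop with a divide-and-conquer run-length encoding: recursively encode each half of the list and merge the two encodings, coalescing the boundary runs when their types match.
import Mathlib
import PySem

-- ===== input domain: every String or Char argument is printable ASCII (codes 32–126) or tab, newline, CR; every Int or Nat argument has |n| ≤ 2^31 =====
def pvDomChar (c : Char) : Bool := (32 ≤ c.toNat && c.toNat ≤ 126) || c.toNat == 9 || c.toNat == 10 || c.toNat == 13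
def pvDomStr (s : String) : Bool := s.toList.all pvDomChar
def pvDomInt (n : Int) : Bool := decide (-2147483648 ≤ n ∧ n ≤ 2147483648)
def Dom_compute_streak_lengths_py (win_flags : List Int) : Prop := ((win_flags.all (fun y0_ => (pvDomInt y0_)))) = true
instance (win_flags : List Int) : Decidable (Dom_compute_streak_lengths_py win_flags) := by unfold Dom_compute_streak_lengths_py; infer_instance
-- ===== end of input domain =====

-- B replaces A's left-to-right current_type/current_len state-machine loop with a divide-and-conquer
-- run-length encoding (recursively encode each half, merge at the boundary); alternative algorithm, same results.


-- ===== PORT A =====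
-- A's loop over win_flags[1:] carrying (current_type, current_len, streaks)
def pvLoopA : List Int → String → Int → List (String × Int) → List (String × Int)
  | [], ct, cl, streaks => streaks ++ [(ct, cl)]
  | f :: rest, ct, cl, streaks =>
    let t := if f = 1 then "win" else "loss"
    if t = ct then pvLoopA rest ct (cl + 1) streaks
    else pvLoopA rest t 1 (streaks ++ [(ct, cl)])

def compute_streak_lengths_py (win_flags : List Int) : List (String × Int) :=
  match win_flags with
  | [] => []
  | f :: rest => pvLoopA rest (if f = 1 then "win" else "loss") 1 []

-- ===== PORT B =====
-- _merge: coalesce the boundary runs of two run-length encodings when their types match.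
-- Source B reads left[-1] and right[0] (both always nonempty where called); the final
-- catch-all branch is a totality guard for the empty cases Python never reaches.
def pvMergeB (left right : List (String × Int)) : List (String × Int) :=
  match left.getLast?, right with
  | some (lt, lc), (rt, rc) :: rtl =>
    if lt = rt then left.dropLast ++ [(lt, lc + rc)] ++ rtl
    else left ++ right
  | _, _ => left ++ right

-- _rle: divide and conquer on the flag list. Python recurses only on nonempty lists;
-- the `length = 0 → []` branch is a totality guard (Python would hit the recursion limit there).
def pvRleB (flags : List Int) : List (String × Int) :=
  if flags.length = 1 then
    [((if flags.headD 0 = 1 then "win" else "loss"), (1 : Int))]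
  else if flags.length = 0 then []
  else
    let mid := flags.length / 2
    pvMergeB (pvRleB (flags.take mid)) (pvRleB (flags.drop mid))
termination_by flags.length
decreasing_by
  · simp only [List.length_take]; omega
  · simp only [List.length_drop]; omega

def compute_streak_lengths_py_alt (win_flags : List Int) : List (String × Int) :=
  match win_flags with
  | [] => []
  | _ => pvRleB win_flags

-- ===== PRECONDITION & SPEC =====
def Spec_compute_streak_lengths_py (win_flags : List Int) (out : List (String × Int)) : Prop := out = compute_streak_lengths_py_alt win_flags
instance (win_flags : List Int) (out : List (String × Int)) : Decidable (Spec_compute_streak_lengths_py win_flags out) := by unfold Spec_compute_streak_lengths_py; infer_instance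

-- ===== CLAIM (what is proved, stated in full; the proofs are below) =====
def Claim_equal_compute_streak_lengths_py : Prop := ∀ (win_flags : List Int), Dom_compute_streak_lengths_py win_flags → Spec_compute_streak_lengths_py win_flags (compute_streak_lengths_py win_flags)

-- ===== LEMMAS AND PROOFS =====

-- canonical run-length grouping of a string list (proof-side reference shape)
def pvGroupRuns : List String → List (String × Int)
  | [] => []
  | t :: rest =>
    (t, (1 : Int) + (rest.takeWhile (· = t)).length) :: pvGroupRuns (rest.dropWhile (· = t))
termination_by l => l.length
decreasing_by
  simp only [List.length_cons]
  exact Nat.lt_succ_of_le (List.length_dropWhile_le _ _)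

def pvLabel (f : Int) : String := if f = 1 then "win" else "loss"

-- A's loop expressed on the already-mapped string list
def pvRunMerge : String → Int → List String → List (String × Int)
  | ct, cl, [] => [(ct, cl)]
  | ct, cl, t :: ts => if t = ct then pvRunMerge ct (cl + 1) ts else (ct, cl) :: pvRunMerge t 1 ts

theorem pvLoopA_eq_runMerge (fs : List Int) (ct : String) (cl : Int) (acc : List (String × Int)) :
    pvLoopA fs ct cl acc = acc ++ pvRunMerge ct cl (fs.map pvLabel) := by
  induction fs generalizing ct cl acc with
  | nil => simp [pvLoopA, pvRunMerge]
  | cons f rest ih =>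
    simp only [pvLoopA, List.map_cons, pvRunMerge, pvLabel]
    by_cases h : (if f = 1 then "win" else "loss") = ct
    · simp [h, ih]
    · simp only [if_neg h, ih]; simp

theorem pvRunMerge_eq_groupRuns (ts : List String) (ct : String) (cl : Int) :
    pvRunMerge ct cl ts = (ct, cl + (ts.takeWhile (· = ct)).length) :: pvGroupRuns (ts.dropWhile (· = ct)) := by
  induction ts generalizing ct cl with
  | nil => simp [pvRunMerge, pvGroupRuns]
  | cons t ts ih =>
    simp only [pvRunMerge]
    split_ifs with h
    · subst h
      rw [ih]
      simp only [List.takeWhile_cons, List.dropWhile_cons, decide_true, if_true, List.length_cons]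
      congr 2
      push_cast
      ring
    · have hd : ¬ (t = ct) := h
      simp only [List.takeWhile_cons, List.dropWhile_cons, decide_eq_true_eq, if_neg hd]
      rw [ih, pvGroupRuns]
      simp

theorem pvA_eq_groupRuns (flags : List Int) :
    compute_streak_lengths_py flags = pvGroupRuns (flags.map pvLabel) := by
  cases flags with
  | nil => simp [compute_streak_lengths_py, pvGroupRuns]
  | cons f rest =>
    simp only [compute_streak_lengths_py, List.map_cons]
    rw [pvLoopA_eq_runMerge, pvRunMerge_eq_groupRuns, pvGroupRuns]
    simp only [pvLabel, List.nil_append]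
    rfl

theorem pvGroupRuns_ne_nil (t : String) (ts : List String) : pvGroupRuns (t :: ts) ≠ [] := by
  rw [pvGroupRuns]; simp

theorem pvGroupRuns_ne_nil_of_ne_nil (l : List String) (h : l ≠ []) : pvGroupRuns l ≠ [] := by
  obtain ⟨t, ts, rfl⟩ := List.exists_cons_of_ne_nil h
  rw [pvGroupRuns]; simp

theorem pvMergeB_cons (x : String × Int) (tail R : List (String × Int))
    (htail : tail ≠ []) (hRne : R ≠ []) :
    pvMergeB (x :: tail) R = x :: pvMergeB tail R := by
  obtain ⟨y, ys, rfl⟩ := List.exists_cons_of_ne_nil htail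
  obtain ⟨r, rtl, rfl⟩ := List.exists_cons_of_ne_nil hRne
  simp only [pvMergeB, List.getLast?_cons_cons]
  rcases h : (y :: ys).getLast? with _ | ⟨lt, lc⟩
  · simp at h
  · rcases r with ⟨rt, rc⟩
    by_cases he : lt = rt <;> simp [he, List.dropLast_cons_of_ne_nil]

-- merging the groupings of two nonempty string lists gives the grouping of their concatenation
theorem pvMergeB_groupRuns : ∀ (n : ℕ) (l r : List String), l.length ≤ n → l ≠ [] → r ≠ [] →
    pvMergeB (pvGroupRuns l) (pvGroupRuns r) = pvGroupRuns (l ++ r) := by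
  intro n
  induction n with
  | zero => intro l r hl hne _; cases l <;> simp_all
  | succ n ih =>
    intro l r hl hne hr
    obtain ⟨t, rest, rfl⟩ := List.exists_cons_of_ne_nil hne
    obtain ⟨u, us, rfl⟩ := List.exists_cons_of_ne_nil hr
    have hcons : (t :: rest) ++ u :: us = t :: (rest ++ u :: us) := by simp
    rw [pvGroupRuns]
    by_cases hdw : rest.dropWhile (· = t) = []
    · -- the whole of rest equals t: the left grouping is a single run
      have hall : rest.takeWhile (· = t) = rest := by
        have := List.takeWhile_append_dropWhile (p := (· = t)) (l := rest)
        rw [hdw, List.append_nil] at this; exact this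
      rw [hdw, pvGroupRuns, hall]
      have htw0 : (rest.takeWhile (· = t)).length = rest.length := by rw [hall]
      by_cases htu : t = u
      · subst htu
        rw [pvGroupRuns]
        simp only [pvMergeB, List.getLast?_singleton]
        rw [if_pos trivial, List.dropLast_singleton, List.nil_append, hcons, pvGroupRuns]
        have htw : (rest ++ t :: us).takeWhile (· = t) = rest ++ (t :: us).takeWhile (· = t) := by
          rw [List.takeWhile_append, if_pos htw0]
        have hdw2 : (rest ++ t :: us).dropWhile (· = t) = (t :: us).dropWhile (· = t) := by
          rw [List.dropWhile_append, if_pos (by simp [hdw])]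
        rw [htw, hdw2]
        simp only [List.takeWhile_cons, List.dropWhile_cons, decide_true, if_true,
          List.length_append, List.length_cons]
        rw [List.singleton_append]
        congr 2
        push_cast
        ring
      · rw [pvGroupRuns]
        simp only [pvMergeB, List.getLast?_singleton]
        rw [if_neg htu, hcons, pvGroupRuns]
        have htw : (rest ++ u :: us).takeWhile (· = t) = rest := by
          rw [List.takeWhile_append, if_pos htw0, List.takeWhile_cons]
          simp [Ne.symm htu]
        have hdw2 : (rest ++ u :: us).dropWhile (· = t) = u :: us := by
          rw [List.dropWhile_append, if_pos (by simp [hdw]), List.dropWhile_cons]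
          simp [Ne.symm htu]
        rw [htw, hdw2, pvGroupRuns]
        simp
    · -- the left grouping has at least two runs: peel its head run and recurse
      have hlen : (rest.dropWhile (· = t)).length ≤ n := by
        have h1 := List.length_dropWhile_le (p := (· = t)) (l := rest)
        simp only [List.length_cons] at hl
        omega
      rw [pvMergeB_cons _ _ _ (pvGroupRuns_ne_nil_of_ne_nil _ hdw) (pvGroupRuns_ne_nil u us)]
      rw [ih _ _ hlen hdw (by simp)]
      rw [hcons, pvGroupRuns]
      have htw : (rest ++ u :: us).takeWhile (· = t) = rest.takeWhile (· = t) := by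
        rw [List.takeWhile_append, if_neg]
        intro hlen2
        apply hdw
        have heq : rest.takeWhile (· = t) = rest := (List.takeWhile_prefix _).eq_of_length hlen2
        rw [List.dropWhile_eq_nil_iff]
        intro x hx
        exact List.mem_takeWhile_imp (p := (· = t)) (by rw [heq]; exact hx)
      have hdw2 : (rest ++ u :: us).dropWhile (· = t) = rest.dropWhile (· = t) ++ u :: us := by
        rw [List.dropWhile_append, if_neg (by simp [hdw])]
      rw [htw, hdw2]

theorem pvRleB_eq_groupRuns : ∀ (n : ℕ) (flags : List Int), flags.length ≤ n → flags ≠ [] →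
    pvRleB flags = pvGroupRuns (flags.map pvLabel) := by
  intro n
  induction n with
  | zero => intro flags hl hne; cases flags <;> simp_all
  | succ n ih =>
    intro flags hl hne
    by_cases h1 : flags.length = 1
    · obtain ⟨f, rest, rfl⟩ := List.exists_cons_of_ne_nil hne
      have : rest = [] := by simpa using h1
      subst this
      rw [pvRleB]
      simp [pvGroupRuns, pvLabel]
    · have h2 : 2 ≤ flags.length := by
        cases flags with
        | nil => simp at hne
        | cons a b => simp only [List.length_cons] at h1 ⊢; omega
      rw [pvRleB, if_neg h1, if_neg (by omega)]
      show pvMergeB (pvRleB (flags.take (flags.length / 2))) (pvRleB (flags.drop (flags.length / 2))) = _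
      have hmid : 1 ≤ flags.length / 2 ∧ flags.length / 2 < flags.length := by omega
      have htne : flags.take (flags.length / 2) ≠ [] := by
        intro h
        have := congrArg List.length h
        simp only [List.length_take, List.length_nil] at this
        omega
      have hdne : flags.drop (flags.length / 2) ≠ [] := by
        intro h
        have := congrArg List.length h
        simp only [List.length_drop, List.length_nil] at this
        omega
      have hlt : (flags.take (flags.length / 2)).length ≤ n := by
        simp only [List.length_take]; omega
      have hld : (flags.drop (flags.length / 2)).length ≤ n := by
        simp only [List.length_drop]; omega
      rw [ih _ hlt htne, ih _ hld hdne,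
        pvMergeB_groupRuns ((flags.take (flags.length / 2)).map pvLabel).length _ _ le_rfl
          (by simpa using htne) (by simpa using hdne),
        ← List.map_append, List.take_append_drop]

-- ===== VERDICT (by name: the statement is the Claim_ definition above) =====
theorem compute_streak_lengths_py_spec : Claim_equal_compute_streak_lengths_py := by
  intro win_flags _
  unfold Spec_compute_streak_lengths_py
  rw [pvA_eq_groupRuns]
  cases win_flags with
  | nil => simp [compute_streak_lengths_py_alt, pvGroupRuns]
  | cons f rest =>
    show pvGroupRuns ((f :: rest).map pvLabel) = pvRleB (f :: rest)
    rw [pvRleB_eq_groupRuns (f :: rest).length _ le_rfl (by simp)]
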